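-- pv_equiv track=rewrite | github.com/shivam23505/Assembler-and-Simulator--RISC-V-ISA | Assembler/binary_functions.py | Binary_5_convert
-- ===== SOURCE A (Python) =====
-- def Binary_5_convert(num):
--     s=""
--     while num!=0:
--         s+=str(num%2)
--         num = num//2
--     if (len(s)<5):
--         m = "0"*(5-len(s))
--         s= m + s
--     return s
-- ===== SOURCE B (Python) =====
-- def Binary_5_convert(num):
--     # Same LSB-first 5-padded binary string, built by a library call instead of a digit loop.
--     return format(num, 'b')[::-1].zfill(5)
-- ===== Notes on version B (the rewrite author's own statement) =====
-- stated objective: idiomatic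
-- what changed: Replaces the manual LSB-accumulating while loop and hand-made zero padding with format(num,'b') reversed by a slice and zfill(5).
import Mathlib
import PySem

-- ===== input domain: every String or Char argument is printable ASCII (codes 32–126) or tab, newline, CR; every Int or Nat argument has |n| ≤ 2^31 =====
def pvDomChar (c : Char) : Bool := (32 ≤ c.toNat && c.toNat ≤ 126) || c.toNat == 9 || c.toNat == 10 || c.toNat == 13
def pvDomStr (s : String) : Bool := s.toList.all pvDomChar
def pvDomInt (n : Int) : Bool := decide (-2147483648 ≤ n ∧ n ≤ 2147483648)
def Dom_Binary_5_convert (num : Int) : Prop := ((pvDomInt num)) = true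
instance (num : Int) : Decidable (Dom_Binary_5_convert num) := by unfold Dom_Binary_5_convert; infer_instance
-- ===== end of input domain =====

-- B replaces A's manual LSB digit loop + hand padding with format(num,'b') reversed and zfill(5) (idiomatic, same cost).


-- ===== PORT A =====
-- the while loop: s += str(num % 2); num = num // 2.  Faithful for num ≥ 0 (there
-- Python's % and // on 2 coincide with Nat's); for num < 0 the Python loop diverges
-- and those inputs are excluded by Pre_.
def pvALoop : Nat → List Char → List Char
  | 0, s => s
  | n+1, s => pvALoop ((n+1)/2) (s ++ PySem.Int.toChars (((n+1) % 2 : Nat) : Int))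
decreasing_by exact Nat.div_lt_self (Nat.succ_pos n) (by omega)

def Binary_5_convert (num : Int) : String :=
  let s := pvALoop num.toNat []
  let s := if s.length < 5 then List.replicate (5 - s.length) '0' ++ s else s
  String.ofList s

-- ===== PORT B =====
def Binary_5_convert_alt (num : Int) : String :=
  let r := PySem.Int.toBin num                              -- format(num, 'b')
  let rev := (PySem.Str.slice? r none none (-1)).getD r     -- r[::-1] (step -1 never raises; getD only for totality)
  PySem.Str.zfill rev 5                                     -- .zfill(5)

-- ===== PRECONDITION & SPEC =====
-- Pre_ excludes num < 0, on which the Python A loops forever (num // 2 never reaches 0).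
def Pre_Binary_5_convert (num : Int) : Prop := 0 ≤ num
instance (num : Int) : Decidable (Pre_Binary_5_convert num) := by unfold Pre_Binary_5_convert; infer_instance
def pvWitness_Binary_5_convert : Int := (6)

def Spec_Binary_5_convert (num : Int) (out : String) : Prop := out = Binary_5_convert_alt num
instance (num : Int) (out : String) : Decidable (Spec_Binary_5_convert num out) := by unfold Spec_Binary_5_convert; infer_instance

-- ===== CLAIM (what is proved, stated in full; the proofs are below) =====
def Claim_equal_Binary_5_convert : Prop := ∀ (num : Int), Dom_Binary_5_convert num → Pre_Binary_5_convert num → Spec_Binary_5_convert num (Binary_5_convert num)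

-- ===== LEMMAS AND PROOFS =====

-- the LSB-first digit list of n (proof-side characterisation of both programs' core)
def pvLsb : Nat → List Char
  | 0 => []
  | n+1 => Nat.digitChar ((n+1) % 2) :: pvLsb ((n+1)/2)
decreasing_by exact Nat.div_lt_self (Nat.succ_pos n) (by omega)

theorem pvALoop_eq (n : Nat) : ∀ s, pvALoop n s = s ++ pvLsb n := by
  induction n using Nat.strong_induction_on with
  | _ n ih =>
    intro s
    match n with
    | 0 => simp [pvALoop, pvLsb]
    | n+1 =>
      rw [pvALoop, pvLsb, ih ((n+1)/2) (Nat.div_lt_self (Nat.succ_pos n) (by omega))]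
      have h2 : (n+1) % 2 = 0 ∨ (n+1) % 2 = 1 := by omega
      have e0 : PySem.Int.toChars (0:Int) = [Nat.digitChar 0] := by decide
      have e1 : PySem.Int.toChars (1:Int) = [Nat.digitChar 1] := by decide
      rcases h2 with h | h <;> rw [h] <;> simp [e0, e1]

theorem pvCore_eq (f : Nat) : ∀ (n : Nat) (ds : List Char), 0 < n → n ≤ f →
    Nat.toDigitsCore 2 f n ds = (pvLsb n).reverse ++ ds := by
  induction f with
  | zero => intro n ds h1 h2; omega
  | succ f ih =>
    intro n ds h1 h2
    match n, h1 with
    | n+1, _ =>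
      rw [Nat.toDigitsCore, pvLsb]
      by_cases h : (n+1)/2 = 0
      · simp [h, pvLsb]
      · rw [if_neg h, ih ((n+1)/2) _ (by omega) (by omega)]
        simp

theorem pvToDigits_pos (n : Nat) (h : 0 < n) : Nat.toDigits 2 n = (pvLsb n).reverse := by
  rw [Nat.toDigits, pvCore_eq (n+1) n [] h (by omega)]; simp

theorem pvLsb_head (n : Nat) (h : 0 < n) :
    ∃ c rest, pvLsb n = c :: rest ∧ c ≠ '+' ∧ c ≠ '-' := by
  match n, h with
  | n+1, _ =>
    refine ⟨Nat.digitChar ((n+1) % 2), pvLsb ((n+1)/2), by rw [pvLsb], ?_, ?_⟩ <;>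
      (have h2 : (n+1) % 2 = 0 ∨ (n+1) % 2 = 1 := by omega
       rcases h2 with h | h <;> rw [h] <;> decide)

-- ===== VERDICT (by name: the statement is the Claim_ definition above) =====
theorem Binary_5_convert_spec : Claim_equal_Binary_5_convert := by
  intro num _ hpre
  unfold Spec_Binary_5_convert
  apply String.toList_inj.mp
  dsimp only [Binary_5_convert, Binary_5_convert_alt]
  rw [PySem.Str.slice?_none_none_neg_one, Option.getD_some, PySem.Str.toList_zfill]
  simp only [String.toList_ofList, PySem.Int.toList_toBin, PySem.Int.toBinChars]
  obtain ⟨n, rfl⟩ : ∃ n : Nat, num = (n : Int) := ⟨num.toNat, by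
    have : (0:Int) ≤ num := hpre
    omega⟩
  rw [if_neg (show ¬((n:Int) < 0) from by exact_mod_cast Int.not_lt.mpr (Int.natCast_nonneg n))]
  rw [pvALoop_eq]
  simp only [Int.toNat_natCast, List.nil_append]
  rcases Nat.eq_zero_or_pos n with h0 | hpos
  · subst h0
    rw [show pvLsb 0 = [] from by simp [pvLsb]]
    decide
  · rw [pvToDigits_pos n hpos, List.reverse_reverse]
    obtain ⟨c, rest, hcons, hp, hm⟩ := pvLsb_head n hpos
    rw [hcons, PySem.Chars.zfill.eq_def]
    by_cases hlen : (c :: rest).length < 5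
    · rw [if_pos hlen, if_neg (show ¬((5:Int) ≤ ((c :: rest).length : Int)) from by push_cast; omega)]
      dsimp only
      rw [if_neg (by tauto)]
      congr 1
    · rw [if_neg hlen, if_pos (show (5:Int) ≤ ((c :: rest).length : Int) from by push_cast; omega)]
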